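-- pv_equiv track=rewrite | github.com/muskan-1234/python3-Python-Functions-Files-and-Dictionaries | python_Functions_Files_Dictionaries_Assessment6.py | beginning
-- ===== SOURCE A (Python) =====
-- def beginning(list):
--     index=0
--     sub=[]
--     while index<len(list):
--         if list[index]!='bye':
--             sub.append(list[index])
--
--         else:
--             break
--         index+=1
--
--     if len(sub)>10:
--         max=[]
--         index=0
--         while index<10:
--             max.append(sub[index])
--             index+=1
--         return max
--     else:
--         return sub
-- ===== SOURCE B (Python) =====
-- def beginning(list):
--     cutoff = list.index('bye') if 'bye' in list else len(list)
--     return list[:min(cutoff, 10)]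
-- ===== Notes on version B (the rewrite author's own statement) =====
-- stated objective: simpler
-- what changed: Replaces the element-by-element accumulate loop plus a second trimming loop with a locate-the-boundary-then-slice decomposition: compute the cutoff (index of 'bye' or the length) and return list[:min(cutoff, 10)] in one step.
import Mathlib
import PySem

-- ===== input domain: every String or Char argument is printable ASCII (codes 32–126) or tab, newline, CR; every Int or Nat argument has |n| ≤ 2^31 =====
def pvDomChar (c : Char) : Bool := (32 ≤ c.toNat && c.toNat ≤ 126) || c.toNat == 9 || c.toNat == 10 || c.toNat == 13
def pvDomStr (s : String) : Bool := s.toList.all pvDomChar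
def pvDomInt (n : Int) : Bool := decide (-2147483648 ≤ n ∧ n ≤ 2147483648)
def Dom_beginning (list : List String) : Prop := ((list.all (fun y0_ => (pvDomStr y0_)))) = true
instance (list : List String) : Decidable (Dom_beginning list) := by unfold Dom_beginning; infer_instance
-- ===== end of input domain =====

-- B replaces A's accumulate-then-trim pair of while loops by locating the 'bye' boundary
-- and taking one capped slice; objective: simpler (same O(n) cost).

-- ===== PORT A =====
-- first while loop: append elements until 'bye' or the end (list[index] is in range since index < len)
def beginningLoop1 (list : List String) (index : Nat) (sub : List String) : List String :=
  if _h : index < list.length then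
    if list.getD index "" ≠ "bye" then beginningLoop1 list (index + 1) (sub ++ [list.getD index ""])
    else sub
  else sub
termination_by list.length - index

-- second while loop: copy sub[0..9] (only entered when 10 < sub.length, so sub[index] is in range)
def beginningLoop2 (sub : List String) (index : Nat) (maxAcc : List String) : List String :=
  if index < 10 then beginningLoop2 sub (index + 1) (maxAcc ++ [sub.getD index ""])
  else maxAcc
termination_by 10 - index

def beginning (list : List String) : List String :=
  let sub := beginningLoop1 list 0 []
  if sub.length > 10 then beginningLoop2 sub 0 [] else sub

-- ===== PORT B =====
def pvCutoff (list : List String) : Int :=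
  match PySem.List.index? list "bye" with
  | some i => (i : Int)
  | none => (list.length : Int)

def beginning_alt (list : List String) : List String :=
  PySem.List.slice list none (some (min (pvCutoff list) 10))

-- ===== PRECONDITION & SPEC =====
def Spec_beginning (list : List String) (out : List String) : Prop := out = beginning_alt list
instance (list : List String) (out : List String) : Decidable (Spec_beginning list out) := by unfold Spec_beginning; infer_instance

-- ===== CLAIM (what is proved, stated in full; the proofs are below) =====
def Claim_equal_beginning : Prop := ∀ (list : List String), Dom_beginning list → Spec_beginning list (beginning list)

-- ===== LEMMAS AND PROOFS =====

-- the cutoff B computes, as a Nat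
def pvCut (list : List String) : Nat := (PySem.List.index? list "bye").getD list.length

theorem loop1_eq_takeWhile (list : List String) :
    ∀ (n index : Nat) (sub : List String), list.length - index ≤ n →
      beginningLoop1 list index sub = sub ++ (list.drop index).takeWhile (· ≠ "bye") := by
  intro n
  induction n with
  | zero =>
    intro index sub h
    have hge : ¬ index < list.length := by omega
    rw [beginningLoop1, dif_neg hge, List.drop_eq_nil_of_le (by omega)]
    simp
  | succ n ih =>
    intro index sub h
    by_cases hlt : index < list.length
    · have hd : list.drop index = list[index] :: list.drop (index + 1) :=
        List.drop_eq_getElem_cons hlt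
      have hg : list.getD index "" = list[index] := by
        simp [List.getD_eq_getElem?_getD, List.getElem?_eq_getElem hlt]
      rw [beginningLoop1, dif_pos hlt]
      by_cases hne : list[index] = "bye"
      · rw [if_neg (by rw [hg, hne]; simp), hd, List.takeWhile_cons, if_neg (by simp [hne])]
        simp
      · rw [if_pos (by rw [hg]; exact hne), ih (index + 1) _ (by omega), hd,
          List.takeWhile_cons, if_pos (by simpa using hne), hg]
        simp
    · rw [beginningLoop1, dif_neg hlt, List.drop_eq_nil_of_le (by omega)]
      simp

theorem loop2_eq_take (sub : List String) (hlen : 10 ≤ sub.length) :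
    ∀ (n index : Nat) (maxAcc : List String), 10 - index ≤ n → index ≤ 10 →
      beginningLoop2 sub index maxAcc = maxAcc ++ ((sub.drop index).take (10 - index)) := by
  intro n
  induction n with
  | zero =>
    intro index maxAcc h hi
    have h10 : index = 10 := by omega
    rw [beginningLoop2, if_neg (by omega)]
    simp [h10]
  | succ n ih =>
    intro index maxAcc h hi
    by_cases hlt : index < 10
    · have hidx : index < sub.length := by omega
      have hd : sub.drop index = sub[index] :: sub.drop (index + 1) :=
        List.drop_eq_getElem_cons hidx
      rw [beginningLoop2, if_pos hlt, ih (index + 1) _ (by omega) (by omega), hd]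
      have hsub : 10 - index = (10 - (index + 1)) + 1 := by omega
      rw [hsub, List.take_succ_cons]
      simp [List.getD_eq_getElem?_getD, List.getElem?_eq_getElem hidx]
    · rw [beginningLoop2, if_neg hlt]
      have h10 : index = 10 := by omega
      simp [h10]

theorem takeWhile_eq_take_cut (list : List String) :
    list.takeWhile (· ≠ "bye") = list.take (pvCut list) := by
  induction list with
  | nil => simp [pvCut]
  | cons x t ih =>
    by_cases hx : x = "bye"
    · subst hx
      unfold pvCut
      rw [PySem.List.index?_cons_self]
      simp
    · have hcut : pvCut (x :: t) = pvCut t + 1 := by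
        unfold pvCut
        rw [PySem.List.index?_cons_of_ne t hx]
        cases PySem.List.index? t "bye" <;> simp
      rw [List.takeWhile_cons, if_pos (by simpa using hx), hcut, List.take_succ_cons, ih]

theorem cut_le_len (list : List String) : pvCut list ≤ list.length := by
  unfold pvCut
  cases h : PySem.List.index? list "bye" with
  | none => simp
  | some k =>
    obtain ⟨hk, _⟩ := PySem.List.getElem_of_index?_eq_some h
    simp
    omega

theorem alt_eq_take (list : List String) :
    beginning_alt list = list.take (min (pvCut list) 10) := by
  unfold beginning_alt pvCutoff pvCut
  cases h : PySem.List.index? list "bye" with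
  | none =>
    have hmin : min ((list.length : Int)) 10 = ((min list.length 10 : Nat) : Int) := by omega
    rw [hmin, PySem.List.slice_to_natCast]
    simp
  | some k =>
    have hmin : min ((k : Int)) 10 = ((min k 10 : Nat) : Int) := by omega
    rw [hmin, PySem.List.slice_to_natCast]
    simp

-- ===== VERDICT (by name: the statement is the Claim_ definition above) =====
theorem beginning_spec : Claim_equal_beginning := by
  intro list _
  unfold Spec_beginning beginning
  rw [loop1_eq_takeWhile list list.length 0 [] (by omega), List.nil_append, List.drop_zero,
    takeWhile_eq_take_cut, alt_eq_take]
  have hc := cut_le_len list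
  have hlen : (list.take (pvCut list)).length = pvCut list := by
    simp [List.length_take]
    omega
  by_cases h10 : 10 < pvCut list
  · rw [if_pos (by omega : (list.take (pvCut list)).length > 10)]
    rw [loop2_eq_take _ (by omega) 10 0 [] (by omega) (by omega)]
    simp only [List.nil_append, List.drop_zero, Nat.sub_zero, List.take_take]
    rw [Nat.min_eq_left (by omega), Nat.min_eq_right (by omega)]
  · rw [if_neg (by omega), Nat.min_eq_left (by omega)]
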